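-- pv_equiv track=rewrite | github.com/n7tms/EverybodyCodes | 2025/q6.py | part2
-- ===== SOURCE A (Python) =====
-- def part2(professions):     # => 3490
--     # count everyone
--     categories = dict()
--     pairs = 0
--     for p in professions:
--         if p.isupper():
--             if p in categories:
--                 categories[p] += 1
--             else:
--                 categories[p] = 1
--         else:
--             if p.upper() in categories:
--                 pairs += categories[p.upper()]
--
--     return pairs
-- ===== SOURCE B (Python) =====
-- def part2(professions):
--     # Reverse pass: tally lowercase elements (keyed by .upper()) seen so far
--     # (i.e. occurring later in the original order); each uppercase element
--     # contributes the tally of its matching lowercase followers.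
--     pairs = 0
--     seen_lower = {}
--     for p in reversed(professions):
--         if p.isupper():
--             pairs += seen_lower.get(p, 0)
--         else:
--             k = p.upper()
--             seen_lower[k] = seen_lower.get(k, 0) + 1
--     return pairs
-- ===== Notes on version B (the rewrite author's own statement) =====
-- stated objective: alternative
-- what changed: B scans the list in reverse maintaining a tally of lowercase elements (keyed by their .upper() form) instead of A's forward pass that tallies uppercase elements; each uppercase element then adds its count of later lowercase matches, which equals A's count of earlier uppercase matches per lowercase element.
import Mathlib
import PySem

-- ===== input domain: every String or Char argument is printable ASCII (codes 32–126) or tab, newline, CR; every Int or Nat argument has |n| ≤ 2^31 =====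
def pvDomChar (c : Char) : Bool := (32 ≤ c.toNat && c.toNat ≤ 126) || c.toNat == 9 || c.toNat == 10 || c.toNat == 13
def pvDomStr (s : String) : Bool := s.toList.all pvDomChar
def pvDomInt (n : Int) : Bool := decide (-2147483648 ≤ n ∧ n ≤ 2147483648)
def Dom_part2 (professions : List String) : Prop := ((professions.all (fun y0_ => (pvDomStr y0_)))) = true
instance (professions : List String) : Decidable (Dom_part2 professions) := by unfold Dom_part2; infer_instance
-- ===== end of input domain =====

-- B replaces A's forward pass (dict of uppercase counts, lookup at each lowercase element)
-- by a reverse pass maintaining a dict of lowercase tallies keyed by .upper(); objective: alternative.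

-- ===== PORT A =====
-- str.isupper(): at least one cased character and no lowercase one — hand port, exact on ASCII (Dom).
def strIsUpper (s : String) : Bool :=
  s.toList.any (fun c => PySem.Chars.isupper c || PySem.Chars.islower c) &&
  s.toList.all (fun c => !PySem.Chars.islower c)

def part2 (professions : List String) : Int :=
  (professions.foldl
    (fun (st : PySem.Dict String Int × Int) p =>
      let categories := st.1
      let pairs := st.2
      if strIsUpper p then
        if categories.contains p then
          (categories.insert p (categories.getD p 0 + 1), pairs)
        else
          (categories.insert p 1, pairs)
      else
        if categories.contains (PySem.Str.upper p) then
          (categories, pairs + categories.getD (PySem.Str.upper p) 0)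
        else
          (categories, pairs))
    (PySem.Dict.empty, 0)).2

-- ===== PORT B =====
def part2_alt (professions : List String) : Int :=
  (professions.reverse.foldl
    (fun (st : Int × PySem.Dict String Int) p =>
      let pairs := st.1
      let seen_lower := st.2
      if strIsUpper p then
        (pairs + seen_lower.getD p 0, seen_lower)
      else
        (pairs, seen_lower.insert (PySem.Str.upper p) (seen_lower.getD (PySem.Str.upper p) 0 + 1)))
    (0, PySem.Dict.empty)).1

-- ===== PRECONDITION & SPEC =====
def Spec_part2 (professions : List String) (out : Int) : Prop := out = part2_alt professions
instance (professions : List String) (out : Int) : Decidable (Spec_part2 professions out) := by unfold Spec_part2; infer_instance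

-- ===== CLAIM (what is proved, stated in full; the proofs are below) =====
def Claim_equal_part2 : Prop := ∀ (professions : List String), Dom_part2 professions → Spec_part2 professions (part2 professions)

-- ===== LEMMAS AND PROOFS =====

-- pointwise +1 at one key
def updG (g : String → Int) (k0 : String) : String → Int := fun k => if k = k0 then g k0 + 1 else g k

-- number of uppercase elements of l equal to k
def cntU (l : List String) (k : String) : Int :=
  ((l.filter (fun p => strIsUpper p && p == k)).length : Int)

-- number of non-uppercase elements of l whose .upper() is k
def cntL (l : List String) (k : String) : Int :=
  ((l.filter (fun p => !strIsUpper p && PySem.Str.upper p == k)).length : Int)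

-- pair count, A's orientation: each uppercase head pairs with later lowercase matches
def SA : List String → Int
  | [] => 0
  | p :: l => (if strIsUpper p then cntL l p else 0) + SA l

-- pair count, B's orientation (on the reversed list)
def SB : List String → Int
  | [] => 0
  | p :: l => (if strIsUpper p then 0 else cntU l (PySem.Str.upper p)) + SB l

-- pending contribution of dict state g to A's remaining pairs
def WA (l : List String) (g : String → Int) : Int :=
  ((l.filter (fun p => !strIsUpper p)).map (fun p => g (PySem.Str.upper p))).sum

-- pending contribution of dict state g to B's remaining pairs
def WB (l : List String) (g : String → Int) : Int :=
  ((l.filter (fun p => strIsUpper p)).map g).sum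

theorem WA_congr (l : List String) (g g' : String → Int) (h : ∀ k, g k = g' k) :
    WA l g = WA l g' := by
  unfold WA; induction l with
  | nil => rfl
  | cons p l ih => by_cases hp : strIsUpper p <;> simp [hp, ih, h]

theorem WB_congr (l : List String) (g g' : String → Int) (h : ∀ k, g k = g' k) :
    WB l g = WB l g' := by
  unfold WB; induction l with
  | nil => rfl
  | cons p l ih => by_cases hp : strIsUpper p <;> simp [hp, ih, h]

theorem WA_upd (l : List String) (g : String → Int) (k0 : String) :
    WA l (updG g k0) = WA l g + cntL l k0 := by
  induction l with
  | nil => simp [WA, cntL]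
  | cons p l ih =>
    by_cases hp : strIsUpper p
    · simpa [WA, cntL, hp] using ih
    · have e1 : WA (p :: l) (updG g k0) = updG g k0 (PySem.Str.upper p) + WA l (updG g k0) := by
        simp [WA, hp]
      have e2 : WA (p :: l) g = g (PySem.Str.upper p) + WA l g := by simp [WA, hp]
      by_cases hk : PySem.Str.upper p = k0
      · have e3 : cntL (p :: l) k0 = cntL l k0 + 1 := by
          simp [cntL, List.filter_cons, hp, hk]
        rw [e1, e2, e3, ih]
        unfold updG
        rw [if_pos hk, hk]; ring
      · have e3 : cntL (p :: l) k0 = cntL l k0 := by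
          simp [cntL, List.filter_cons, hp, hk]
        rw [e1, e2, e3, ih]
        unfold updG
        rw [if_neg hk]; ring

theorem WB_upd (l : List String) (g : String → Int) (k0 : String) :
    WB l (updG g k0) = WB l g + cntU l k0 := by
  induction l with
  | nil => simp [WB, cntU]
  | cons p l ih =>
    by_cases hp : strIsUpper p
    · have e1 : WB (p :: l) (updG g k0) = updG g k0 p + WB l (updG g k0) := by simp [WB, hp]
      have e2 : WB (p :: l) g = g p + WB l g := by simp [WB, hp]
      by_cases hk : p = k0
      · subst hk
        have e3 : cntU (p :: l) p = cntU l p + 1 := by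
          simp [cntU, List.filter_cons, hp]
        rw [e1, e2, e3, ih]
        unfold updG
        rw [if_pos rfl]; ring
      · have e3 : cntU (p :: l) k0 = cntU l k0 := by
          simp [cntU, List.filter_cons, hp, hk]
        rw [e1, e2, e3, ih]
        unfold updG
        rw [if_neg hk]; ring
    · simpa [WB, cntU, hp] using ih

theorem A_loop (l : List String) (d : PySem.Dict String Int) (pairs : Int) :
    (l.foldl
      (fun (st : PySem.Dict String Int × Int) p =>
        let categories := st.1
        let pairs := st.2
        if strIsUpper p then
          if categories.contains p then
            (categories.insert p (categories.getD p 0 + 1), pairs)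
          else
            (categories.insert p 1, pairs)
        else
          if categories.contains (PySem.Str.upper p) then
            (categories, pairs + categories.getD (PySem.Str.upper p) 0)
          else
            (categories, pairs))
      (d, pairs)).2 = pairs + SA l + WA l (fun k => d.getD k 0) := by
    induction l generalizing d pairs with
  | nil => simp [SA, WA]
  | cons p l ih =>
    have eSAu : strIsUpper p = true → SA (p :: l) = cntL l p + SA l := by
      intro h; simp [SA, h]
    have eSAl : strIsUpper p = false → SA (p :: l) = SA l := by
      intro h; simp [SA, h]
    have eWAu : strIsUpper p = true →
        ∀ g, WA (p :: l) g = WA l g := by intro h g; simp [WA, h]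
    have eWAl : strIsUpper p = false →
        ∀ g, WA (p :: l) g = g (PySem.Str.upper p) + WA l g := by intro h g; simp [WA, h]
    simp only [List.foldl_cons]
    by_cases hp : strIsUpper p
    · by_cases hc : d.contains p
      · simp only [hp, hc, if_true]
        rw [ih]
        have hg : ∀ k, (d.insert p (d.getD p 0 + 1)).getD k 0 = updG (fun k => d.getD k 0) p k := by
          intro k; simp [PySem.Dict.getD_insert, updG]
        rw [WA_congr l _ _ hg, WA_upd, eSAu hp, eWAu hp]
        ring
      · simp only [hp, hc, if_true, Bool.false_eq_true, if_false]
        rw [ih]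
        have h0 : d.getD p 0 = 0 := PySem.Dict.getD_of_not_contains _ _ (by simpa using hc)
        have hg : ∀ k, (d.insert p 1).getD k 0 = updG (fun k => d.getD k 0) p k := by
          intro k; simp [PySem.Dict.getD_insert, updG, h0]
        rw [WA_congr l _ _ hg, WA_upd, eSAu hp, eWAu hp]
        ring
    · have hstep : (if d.contains (PySem.Str.upper p) then
            ((d, pairs + d.getD (PySem.Str.upper p) 0) : PySem.Dict String Int × Int)
          else (d, pairs)) = (d, pairs + d.getD (PySem.Str.upper p) 0) := by
        by_cases hc : d.contains (PySem.Str.upper p)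
        · simp [hc]
        · have h0 : d.getD (PySem.Str.upper p) 0 = 0 :=
            PySem.Dict.getD_of_not_contains _ _ (by simpa using hc)
          simp [hc, h0]
      simp only [hp, Bool.false_eq_true, if_false]
      rw [hstep, ih, eSAl (by simpa using hp), eWAl (by simpa using hp)]
      ring

theorem B_loop (l : List String) (seen : PySem.Dict String Int) (pairs : Int) :
    (l.foldl
      (fun (st : Int × PySem.Dict String Int) p =>
        let pairs := st.1
        let seen_lower := st.2
        if strIsUpper p then
          (pairs + seen_lower.getD p 0, seen_lower)
        else
          (pairs, seen_lower.insert (PySem.Str.upper p) (seen_lower.getD (PySem.Str.upper p) 0 + 1)))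
      (pairs, seen)).1 = pairs + SB l + WB l (fun k => seen.getD k 0) := by
  induction l generalizing seen pairs with
  | nil => simp [SB, WB]
  | cons p l ih =>
    simp only [List.foldl_cons]
    by_cases hp : strIsUpper p
    · simp only [hp, if_true]
      rw [ih]
      simp [SB, WB, hp]; ring
    · simp only [hp, if_false, Bool.false_eq_true]
      rw [ih]
      have hg : ∀ k, (seen.insert (PySem.Str.upper p) (seen.getD (PySem.Str.upper p) 0 + 1)).getD k 0
          = updG (fun k => seen.getD k 0) (PySem.Str.upper p) k := by
        intro k; simp [PySem.Dict.getD_insert, updG]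
      rw [WB_congr l _ _ hg, WB_upd]
      simp [SB, WB, hp]; ring

theorem cntU_append (m : List String) (x : String) (k : String) :
    cntU (m ++ [x]) k = cntU m k + (if strIsUpper x && x == k then 1 else 0) := by
  simp only [cntU, List.filter_append]
  by_cases h : strIsUpper x && x == k <;> simp [h]

theorem cntL_reverse (l : List String) (k : String) :
    cntL l.reverse k = cntL l k := by
  simp [cntL, List.filter_reverse]

theorem SB_append (m : List String) (x : String) :
    SB (m ++ [x]) = SB m + (if strIsUpper x then cntL m x else 0) := by
  induction m with
  | nil =>
    by_cases hx : strIsUpper x <;> simp [SB, cntL, cntU, hx]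
  | cons y m ih =>
    have e1 : SB ((y :: m) ++ [x])
        = (if strIsUpper y then 0 else cntU (m ++ [x]) (PySem.Str.upper y)) + SB (m ++ [x]) := by
      simp [SB]
    have e2 : SB (y :: m) = (if strIsUpper y then 0 else cntU m (PySem.Str.upper y)) + SB m := by
      simp [SB]
    by_cases hk : PySem.Str.upper y = x
    · have e3 : ∀ h : strIsUpper y = false,
          cntL (y :: m) x = cntL m x + 1 := by
        intro h; simp [cntL, List.filter_cons, h, hk]
      rw [e1, e2, ih, cntU_append]
      subst hk
      by_cases hy : strIsUpper y
      · have e4 : cntL (y :: m) (PySem.Str.upper y) = cntL m (PySem.Str.upper y) := by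
          simp [cntL, List.filter_cons, hy]
        rw [e4]
        simp [hy] <;> ring
      · rw [e3 (by simpa using hy)]
        by_cases hx : strIsUpper (PySem.Str.upper y) <;> simp [hy, hx] <;> ring
    · have c1 : (strIsUpper x && x == PySem.Str.upper y) = false := by
        by_cases hx : strIsUpper x
        · simp [hx]; intro h; exact absurd h.symm hk
        · simp [hx]
      have e4 : cntL (y :: m) x = cntL m x := by
        by_cases hy : strIsUpper y <;> simp [cntL, List.filter_cons, hy, hk]
      rw [e1, e2, ih, cntU_append, c1, e4]
      by_cases hy : strIsUpper y <;> by_cases hx : strIsUpper x <;> simp [hy, hx] <;> ring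

theorem SA_eq_SB_reverse (l : List String) : SA l = SB l.reverse := by
  induction l with
  | nil => rfl
  | cons p l ih =>
    simp only [SA, List.reverse_cons, SB_append, cntL_reverse, ih]
    ring

theorem WA_zero (l : List String) : WA l (fun _ => 0) = 0 := by
  simp [WA]

theorem WB_zero (l : List String) : WB l (fun _ => 0) = 0 := by
  simp [WB]

theorem part2_eq_SA (l : List String) : part2 l = SA l := by
  unfold part2
  rw [A_loop]
  have : ∀ k, (PySem.Dict.empty : PySem.Dict String Int).getD k 0 = (fun _ => (0:Int)) k := by
    intro k; simp [PySem.Dict.getD_empty]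
  rw [WA_congr _ _ _ this, WA_zero]
  ring

theorem part2_alt_eq_SB (l : List String) : part2_alt l = SB l.reverse := by
  unfold part2_alt
  rw [B_loop]
  have : ∀ k, (PySem.Dict.empty : PySem.Dict String Int).getD k 0 = (fun _ => (0:Int)) k := by
    intro k; simp [PySem.Dict.getD_empty]
  rw [WB_congr _ _ _ this, WB_zero]
  ring

-- ===== VERDICT (by name: the statement is the Claim_ definition above) =====
theorem part2_spec : Claim_equal_part2 := by
  intro l _
  unfold Spec_part2
  rw [part2_eq_SA, part2_alt_eq_SB, SA_eq_SB_reverse]
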